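-- pv_equiv track=rewrite | github.com/thantrieu/Python2030 | net/braniumacademy/ex_chapter4/lesson43/Exercises6.py | draw_rect
-- ===== SOURCE A (Python) =====
-- def draw_rect(mrow, mcol):
--     """Hàm vẽ và trả về hình chữ nhật rỗng bằng các dấu *"""
--     rect = []
--     for x in range(mrow):
--         rect.append([])
--         for y in range(mcol):
--             if x == 0 or x == mrow - 1 or y == 0 or y == mcol - 1:
--                 rect[x].append(' * ')
--             else:
--                 rect[x].append('   ')
--     return rect
-- ===== SOURCE B (Python) =====
-- def draw_rect(mrow, mcol):
--     """Hàm vẽ và trả về hình chữ nhật rỗng bằng các dấu *"""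
--     rect = [['   '] * mcol for _ in range(mrow)]
--     if rect:
--         rect[0] = [' * '] * mcol
--         rect[-1] = [' * '] * mcol
--     if mcol > 0:
--         for row in rect:
--             row[0] = ' * '
--             row[-1] = ' * '
--     return rect
-- ===== Notes on version B (the rewrite author's own statement) =====
-- stated objective: alternative
-- what changed: Replaces A's per-cell border test inside nested loops by a fill-then-overwrite decomposition: build all-interior rows, replace the first and last rows wholesale, then stamp the first and last column of every row.
import Mathlib
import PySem

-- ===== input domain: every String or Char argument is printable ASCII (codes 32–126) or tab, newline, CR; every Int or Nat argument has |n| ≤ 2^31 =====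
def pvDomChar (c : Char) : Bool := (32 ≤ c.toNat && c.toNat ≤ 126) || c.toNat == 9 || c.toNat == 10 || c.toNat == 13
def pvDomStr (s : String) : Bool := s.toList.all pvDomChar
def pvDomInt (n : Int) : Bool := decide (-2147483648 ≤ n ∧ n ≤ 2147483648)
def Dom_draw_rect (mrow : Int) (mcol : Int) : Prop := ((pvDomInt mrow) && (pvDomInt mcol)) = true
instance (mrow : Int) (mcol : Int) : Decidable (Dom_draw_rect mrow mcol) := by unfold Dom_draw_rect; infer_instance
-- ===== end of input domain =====

-- B replaces A's per-cell border test by a fill-then-overwrite decomposition (same cost, alternative structure).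

-- ===== PORT A =====
-- literal port of A: nested loops over range(mrow) × range(mcol), appending per-cell
def draw_rect (mrow : Int) (mcol : Int) : List (List String) :=
  (PySem.List.pyRange 0 mrow 1).foldl (fun rect x =>
    rect ++ [(PySem.List.pyRange 0 mcol 1).foldl (fun row y =>
      row ++ [if x = 0 ∨ x = mrow - 1 ∨ y = 0 ∨ y = mcol - 1 then " * " else "   "]) []]) []

-- ===== PORT B =====
-- literal port of Source B: interior fill, then replace first/last rows, then stamp first/last column
def draw_rect_alt (mrow : Int) (mcol : Int) : List (List String) :=
  let rect := (PySem.List.pyRange 0 mrow 1).map (fun _ => PySem.List.pyRepeat ["   "] mcol)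
  let rect2 := if rect.isEmpty then rect
    else (rect.set 0 (PySem.List.pyRepeat [" * "] mcol)).set
           (rect.length - 1) (PySem.List.pyRepeat [" * "] mcol)
  if 0 < mcol then
    rect2.map (fun row => (row.set 0 " * ").set (row.length - 1) " * ")
  else rect2

-- ===== PRECONDITION & SPEC =====
def Spec_draw_rect (mrow : Int) (mcol : Int) (out : List (List String)) : Prop := out = draw_rect_alt mrow mcol
instance (mrow : Int) (mcol : Int) (out : List (List String)) : Decidable (Spec_draw_rect mrow mcol out) := by unfold Spec_draw_rect; infer_instance

-- ===== CLAIM (what is proved, stated in full; the proofs are below) =====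
def Claim_equal_draw_rect : Prop := ∀ (mrow : Int) (mcol : Int), Dom_draw_rect mrow mcol → Spec_draw_rect mrow mcol (draw_rect mrow mcol)

-- ===== LEMMAS AND PROOFS =====

theorem foldl_append_singleton {α β : Type} (l : List α) (f : α → β) (init : List β) :
    l.foldl (fun acc x => acc ++ [f x]) init = init ++ l.map f := by
  induction l generalizing init with
  | nil => simp
  | cons a t ih => simp [ih]

theorem draw_rect_eq_map (mrow mcol : Int) :
    draw_rect mrow mcol =
      (PySem.List.pyRange 0 mrow 1).map (fun x => (PySem.List.pyRange 0 mcol 1).map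
        (fun y => if x = 0 ∨ x = mrow - 1 ∨ y = 0 ∨ y = mcol - 1 then " * " else "   ")) := by
  simp only [draw_rect, foldl_append_singleton, List.nil_append]

theorem main_eq (mrow mcol : Int) : draw_rect mrow mcol = draw_rect_alt mrow mcol := by
  rw [draw_rect_eq_map]
  unfold draw_rect_alt
  simp only [PySem.List.pyRange_one, PySem.List.pyRepeat_singleton, Int.sub_zero, Int.zero_add,
    List.map_map, Function.comp_def]
  by_cases hr : mrow ≤ 0
  · have h0 : mrow.toNat = 0 := by omega
    simp [h0]
  · have hn0 : mrow.toNat ≠ 0 := by omega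
    set n := mrow.toNat with hnd
    simp only [List.isEmpty_iff, List.map_eq_nil_iff, List.range_eq_nil, hn0, if_false,
      List.length_map, List.length_range]
    by_cases hc : mcol ≤ 0
    · have hm : mcol.toNat = 0 := by omega
      simp only [hm, List.replicate_zero, List.range_zero, List.map_nil,
        if_neg (by omega : ¬ (0:Int) < mcol)]
      apply List.ext_getElem
      · simp
      · intro i h1 h2
        simp
    · have hcpos : (0:Int) < mcol := by omega
      have hm0 : mcol.toNat ≠ 0 := by omega
      set m := mcol.toNat with hmd
      simp only [if_pos hcpos]
      apply List.ext_getElem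
      · simp
      · intro i h1 h2
        simp only [List.length_map, List.length_range] at h1
        simp only [List.getElem_map, List.getElem_range, List.getElem_set]
        have hx0 : ((i:Int) = 0) = (0 = i) := by simp; omega
        have hx1 : ((i:Int) = mrow - 1) = (n - 1 = i) := by
          simp only [eq_iff_iff]; omega
        by_cases e1 : n - 1 = i <;> by_cases e2 : 0 = i <;>
          · simp only [e1, e2, if_true, if_false, hx0, hx1]
            apply List.ext_getElem
            · simp
            · intro j hj1 hj2
              simp only [List.length_map, List.length_range] at hj1
              simp only [List.getElem_map, List.getElem_range,                 List.length_replicate, List.getElem_set, List.getElem_replicate]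
              have hy0 : ((j:Int) = 0) = (0 = j) := by simp; omega
              have hy1 : ((j:Int) = mcol - 1) = (m - 1 = j) := by
                simp only [eq_iff_iff]; omega
              simp only [hy0, hy1, true_or, or_true, false_or]
              split_ifs <;> first | rfl | omega


-- ===== VERDICT (by name: the statement is the Claim_ definition above) =====
theorem draw_rect_spec : Claim_equal_draw_rect := by
  intro mrow mcol _
  unfold Spec_draw_rect
  exact main_eq mrow mcol
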